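-- pv_equiv track=rewrite | github.com/chenshuai9101/memory-enhancer | scripts/memory_engine.py | memory_summarize
-- ===== SOURCE A (Python) =====
-- from typing import Dict, List, Optional, Any
--
-- def memory_summarize(conversation: List[Dict], max_length: int = 500) -> str:
--     """对话摘要"""
--     # 简单实现：取前N条关键信息
--     summary_parts = []
--     current_length = 0
--
--     for msg in conversation:
--         content = msg.get("content", "")
--         if current_length + len(content) > max_length:
--             break
--         summary_parts.append(content)
--         current_length += len(content)
--
--     return " | ".join(summary_parts)
-- ===== SOURCE B (Python) =====
-- from bisect import bisect_right
-- from typing import Dict, List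
--
--
-- def memory_summarize(conversation: List[Dict], max_length: int = 500) -> str:
--     # Stage 1: extract contents and build the prefix-sum table of their lengths.
--     contents = [msg.get("content", "") for msg in conversation]
--     prefix = [0]
--     for c in contents:
--         prefix.append(prefix[-1] + len(c))
--     # Stage 2: prefix is non-decreasing (lengths are >= 0), so binary-search for
--     # the number of messages whose cumulative length stays within max_length.
--     k = max(bisect_right(prefix, max_length) - 1, 0)
--     return " | ".join(contents[:k])
-- ===== Notes on version B (the rewrite author's own statement) =====
-- stated objective: alternative
-- what changed: Replaces the accumulate-and-break loop with two separate stages: build a prefix-sum table of content lengths, then binary-search it (bisect_right) for the number of messages that fit within max_length and join that slice.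
import Mathlib
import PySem

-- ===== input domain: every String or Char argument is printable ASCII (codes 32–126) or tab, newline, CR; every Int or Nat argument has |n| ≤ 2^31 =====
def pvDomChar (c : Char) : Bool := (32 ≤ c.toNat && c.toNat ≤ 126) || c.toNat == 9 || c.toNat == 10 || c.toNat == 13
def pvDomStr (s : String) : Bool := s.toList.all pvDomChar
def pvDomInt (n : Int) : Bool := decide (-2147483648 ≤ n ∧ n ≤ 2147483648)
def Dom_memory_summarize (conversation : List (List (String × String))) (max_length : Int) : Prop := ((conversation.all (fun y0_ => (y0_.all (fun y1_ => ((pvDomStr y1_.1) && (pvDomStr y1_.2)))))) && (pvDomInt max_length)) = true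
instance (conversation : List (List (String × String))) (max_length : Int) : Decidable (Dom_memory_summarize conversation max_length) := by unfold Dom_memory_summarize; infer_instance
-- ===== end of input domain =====

-- B stages the work differently: build the prefix-sum table of content lengths, then
-- binary-search (bisect_right) for how many messages fit; return values are equal.

-- ===== PORT A =====
-- msg.get("content", "") on the association-list encoding of a dict (first match wins)
def pyMsgGet (msg : List (String × String)) : String :=
  ((msg.find? (fun kv => kv.1 == "content")).map (fun kv => kv.2)).getD ""

-- the for-loop with break, as structural recursion over the remaining messages,
-- carrying current_length; returns the collected summary_parts
def memory_summarize_loop (msgs : List (List (String × String))) (current_length : Int)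
    (max_length : Int) : List String :=
  match msgs with
  | [] => []
  | msg :: rest =>
    let content := pyMsgGet msg
    if current_length + PySem.Str.len content > max_length then []
    else content :: memory_summarize_loop rest (current_length + PySem.Str.len content) max_length

def memory_summarize (conversation : List (List (String × String))) (max_length : Int) : String :=
  PySem.Str.join " | " (memory_summarize_loop conversation 0 max_length)

-- ===== PORT B =====
-- bisect.bisect_right(a, x) restricted to Int lists: the standard lo/hi halving loop
-- (mid = (lo+hi)//2 is inlined at its two uses)
def pyBisectRight (xs : List Int) (x : Int) (lo hi : Nat) : Nat :=
  if _h : lo < hi then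
    if x < xs.getD ((lo + hi) / 2) 0 then pyBisectRight xs x lo ((lo + hi) / 2)
    else pyBisectRight xs x ((lo + hi) / 2 + 1) hi
  else lo
termination_by hi - lo

def memory_summarize_alt (conversation : List (List (String × String))) (max_length : Int) : String :=
  let contents := conversation.map (fun msg => pyMsgGet msg)
  -- prefixSums = [0]; for c in contents: prefixSums.append(prefixSums[-1] + len(c))
  let prefixSums := contents.foldl (fun acc c => acc ++ [acc.getLastD 0 + PySem.Str.len c]) [0]
  let k : Int := max ((pyBisectRight prefixSums max_length 0 prefixSums.length : Int) - 1) 0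
  PySem.Str.join " | " (contents.take k.toNat)

-- ===== PRECONDITION & SPEC =====
def Spec_memory_summarize (conversation : List (List (String × String))) (max_length : Int) (out : String) : Prop := out = memory_summarize_alt conversation max_length
instance (conversation : List (List (String × String))) (max_length : Int) (out : String) : Decidable (Spec_memory_summarize conversation max_length out) := by unfold Spec_memory_summarize; infer_instance

-- ===== CLAIM (what is proved, stated in full; the proofs are below) =====
def Claim_equal_memory_summarize : Prop := ∀ (conversation : List (List (String × String))) (max_length : Int), Dom_memory_summarize conversation max_length → Spec_memory_summarize conversation max_length (memory_summarize conversation max_length)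

-- ===== LEMMAS AND PROOFS =====

-- running prefix sums starting after total c (proof-side normal form of the prefix table)
def pvAccum (c : Int) (lens : List Int) : List Int :=
  match lens with
  | [] => []
  | l :: rest => (c + l) :: pvAccum (c + l) rest

-- B's fold builds exactly A ++ pvAccum (last of A)
theorem prefix_fold_eq (lens : List Int) (A : List Int) :
    lens.foldl (fun acc c => acc ++ [acc.getLastD 0 + c]) A = A ++ pvAccum (A.getLastD 0) lens := by
  induction lens generalizing A with
  | nil => simp [pvAccum]
  | cons l r ih =>
    simp only [List.foldl_cons]
    rw [ih (A ++ [A.getLastD 0 + l])]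
    simp [pvAccum, List.getLastD_concat]

theorem pvAccum_ge (c : Int) (lens : List Int) (hl : ∀ l ∈ lens, 0 ≤ l) :
    ∀ y ∈ pvAccum c lens, c ≤ y := by
  induction lens generalizing c with
  | nil => simp [pvAccum]
  | cons l r ih =>
    intro y hy
    have hl0 : 0 ≤ l := hl l (by simp)
    rcases (by simpa [pvAccum] using hy : y = c + l ∨ y ∈ pvAccum (c + l) r) with h | h
    · omega
    · have := ih (c + l) (fun x hx => hl x (by simp [hx])) y h; omega

theorem pvAccum_sorted (c : Int) (lens : List Int) (hl : ∀ l ∈ lens, 0 ≤ l) :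
    List.Pairwise (· ≤ ·) (c :: pvAccum c lens) := by
  induction lens generalizing c with
  | nil => simp [pvAccum]
  | cons l r ih =>
    have hl0 : 0 ≤ l := hl l (by simp)
    have ih' := ih (c + l) (fun x hx => hl x (by simp [hx]))
    refine List.Pairwise.cons ?_ ih'
    intro y hy
    rcases (by simpa [pvAccum] using hy : y = c + l ∨ y ∈ pvAccum (c + l) r) with h | h
    · omega
    · have := pvAccum_ge (c + l) r (fun x hx => hl x (by simp [hx])) y h; omega

-- bisect_right on any list computes cnt, given the two boundary properties of cnt
theorem bisect_eq (xs : List Int) (x : Int) (cnt lo hi : Nat)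
    (hhi : hi ≤ xs.length)
    (h1 : ∀ i, i < cnt → xs.getD i 0 ≤ x)
    (h2 : ∀ i, cnt ≤ i → i < xs.length → x < xs.getD i 0)
    (hlo : lo ≤ cnt) (hch : cnt ≤ hi) :
    pyBisectRight xs x lo hi = cnt := by
  unfold pyBisectRight
  split
  · next h =>
    split
    · next hmid =>
      have hc : cnt ≤ (lo + hi) / 2 := by
        by_contra hc
        exact absurd (h1 ((lo + hi) / 2) (by omega)) (by simpa using hmid)
      exact bisect_eq xs x cnt lo ((lo + hi) / 2) (by omega) h1 h2 hlo hc
    · next hmid =>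
      have hc : (lo + hi) / 2 + 1 ≤ cnt := by
        by_contra hc
        exact absurd (h2 ((lo + hi) / 2) (by omega) (by omega)) (by simpa using hmid)
      exact bisect_eq xs x cnt ((lo + hi) / 2 + 1) hi hhi h1 h2 hc hch
  · next h => omega
termination_by hi - lo

theorem takeWhile_le (xs : List Int) (p : Int → Bool) :
    (xs.takeWhile p).length ≤ xs.length := by
  induction xs with
  | nil => simp
  | cons a r ih =>
    by_cases hp : p a = true <;> simp [List.takeWhile_cons, hp] <;> omega

-- every element of the takeWhile prefix satisfies the predicate (via getD)
theorem takeWhile_getD {p : Int → Bool} (xs : List Int) (i : Nat)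
    (hi : i < (xs.takeWhile p).length) : p (xs.getD i 0) = true := by
  induction xs generalizing i with
  | nil => simp at hi
  | cons a r ih =>
    by_cases hp : p a = true
    · cases i with
      | zero => simpa using hp
      | succ j =>
        simp only [List.takeWhile_cons, hp, if_true, List.length_cons] at hi
        simpa [List.getD_cons_succ] using ih j (by omega)
    · simp [List.takeWhile_cons, hp] at hi

-- the element just past the takeWhile prefix fails the predicate
theorem takeWhile_stop {p : Int → Bool} (xs : List Int)
    (h : (xs.takeWhile p).length < xs.length) :
    p (xs.getD (xs.takeWhile p).length 0) = false := by
  induction xs with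
  | nil => simp at h
  | cons a r ih =>
    by_cases hp : p a = true
    · simp only [List.takeWhile_cons, hp, if_true, List.length_cons] at h ⊢
      simpa [List.getD_cons_succ] using ih (by omega)
    · simpa [List.takeWhile_cons, hp] using hp

-- on a sorted list, everything at or past the stop index exceeds x
theorem sorted_past_stop (xs : List Int) (x : Int)
    (hs : List.Pairwise (· ≤ ·) xs) :
    ∀ i, (xs.takeWhile (fun a => a ≤ x)).length ≤ i → i < xs.length →
      x < xs.getD i 0 := by
  intro i hcnt hi
  set cnt := (xs.takeWhile (fun a => a ≤ x)).length with hc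
  have hcl : cnt < xs.length := by omega
  have hstop : ¬ (xs.getD cnt 0 ≤ x) := by
    have := takeWhile_stop (p := fun a => decide (a ≤ x)) xs (by simpa [hc] using hcl)
    simpa [hc] using this
  rcases Nat.eq_or_lt_of_le hcnt with h | h
  · rw [← h]; omega
  · have hmono : xs.getD cnt 0 ≤ xs.getD i 0 := by
      have hR := (List.pairwise_iff_getElem.mp hs) cnt i hcl hi h
      rw [List.getD_eq_getElem xs 0 hcl, List.getD_eq_getElem xs 0 hi]
      exact hR
    omega

-- A's loop = take of the count of fitting cumulative sums
theorem memory_summarize_loop_take (msgs : List (List (String × String))) (c max_length : Int) :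
    memory_summarize_loop msgs c max_length =
      (msgs.map (fun msg => pyMsgGet msg)).take
        ((pvAccum c ((msgs.map (fun msg => pyMsgGet msg)).map PySem.Str.len)).takeWhile
          (fun a => a ≤ max_length)).length := by
  induction msgs generalizing c with
  | nil => simp [memory_summarize_loop, pvAccum]
  | cons msg rest ih =>
    simp only [memory_summarize_loop, List.map_cons, pvAccum, List.takeWhile_cons]
    by_cases h : c + PySem.Str.len (pyMsgGet msg) ≤ max_length
    · rw [if_neg (by omega), if_pos (by simpa using h)]
      simp [ih, Function.comp_def]
    · rw [if_pos (by omega), if_neg (by simpa using h)]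
      simp

-- lengths are nonnegative
theorem len_nonneg (s : String) : (0 : Int) ≤ PySem.Str.len s := by
  simp [PySem.Str.len_eq]

-- ===== VERDICT (by name: the statement is the Claim_ definition above) =====
theorem memory_summarize_spec : Claim_equal_memory_summarize := by
  intro conversation max_length _
  show memory_summarize conversation max_length = memory_summarize_alt conversation max_length
  unfold memory_summarize
  have halt : memory_summarize_alt conversation max_length =
      PySem.Str.join " | " ((conversation.map (fun msg => pyMsgGet msg)).take
        (max ((pyBisectRight
            ((conversation.map (fun msg => pyMsgGet msg)).foldl
              (fun acc c => acc ++ [acc.getLastD 0 + PySem.Str.len c]) [0]) max_length 0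
            ((conversation.map (fun msg => pyMsgGet msg)).foldl
              (fun acc c => acc ++ [acc.getLastD 0 + PySem.Str.len c]) [0]).length : Int) - 1) 0).toNat) := rfl
  rw [halt]
  set contents := conversation.map (fun msg => pyMsgGet msg) with hcont
  set lens := contents.map PySem.Str.len with hlens
  have hl : ∀ l ∈ lens, 0 ≤ l := by
    intro l hml
    rcases List.mem_map.mp hml with ⟨s, _, rfl⟩
    exact len_nonneg s
  have hpre : contents.foldl (fun acc c => acc ++ [acc.getLastD 0 + PySem.Str.len c]) [0]
      = 0 :: pvAccum 0 lens := by
    have h := prefix_fold_eq lens [0]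
    rw [hlens, List.foldl_map] at h
    simpa using h
  rw [memory_summarize_loop_take, ← hcont, ← hlens, hpre]
  set P := (0 : Int) :: pvAccum 0 lens with hP
  set cnt := (P.takeWhile (fun a => a ≤ max_length)).length with hcnt
  have hsorted : List.Pairwise (· ≤ ·) P := pvAccum_sorted 0 lens hl
  have hb : pyBisectRight P max_length 0 P.length = cnt :=
    bisect_eq P max_length cnt 0 P.length le_rfl
      (fun i hi => by simpa using takeWhile_getD (p := fun a => decide (a ≤ max_length)) P i (by simpa [hcnt] using hi))
      (sorted_past_stop P max_length hsorted)
      (Nat.zero_le _) (by simpa [hcnt] using takeWhile_le P (fun a => decide (a ≤ max_length)))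
  rw [hb]
  have hsplit : ((pvAccum 0 lens).takeWhile (fun a => a ≤ max_length)).length =
      (max ((cnt : Int) - 1) 0).toNat := by
    by_cases h0 : (0 : Int) ≤ max_length
    · have : cnt = ((pvAccum 0 lens).takeWhile (fun a => a ≤ max_length)).length + 1 := by
        simp [hcnt, hP, List.takeWhile_cons, h0]
      omega
    · have h1 : cnt = 0 := by
        simp only [hcnt, hP, List.takeWhile_cons]
        rw [if_neg (by simpa using h0)]
        rfl
      have h2 : (pvAccum 0 lens).takeWhile (fun a => a ≤ max_length) = [] := by
        cases he : pvAccum 0 lens with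
        | nil => simp
        | cons a r =>
          have ha : (0 : Int) ≤ a := pvAccum_ge 0 lens hl a (by simp [he])
          rw [List.takeWhile_cons, if_neg (by simp; omega)]
      simp [h1, h2]
  rw [hsplit]
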